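-- pv_equiv track=rewrite | github.com/MathKeyboardEngine/MathKeyboardEngine.Python | src/helpers/concat_latex.py | ends_with_latex_command
-- ===== SOURCE A (Python) =====
-- def ends_with_latex_command(latex: str) -> bool:
--     if len(latex) == 0:
--         return False
--     if latex[-1].isalpha():
--         for i in range(len(latex) - 2, -1, -1):
--             c = latex[i]
--             if c.isalpha():
--                 continue
--             else:
--                 return c == '\\'
--     return False
-- ===== SOURCE B (Python) =====
-- def ends_with_latex_command(latex: str) -> bool:
--     # One forward pass: track whether the suffix read so far is a backslash
--     # followed only by letters (armed), and whether it has at least one letter.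
--     armed = False
--     has_letter = False
--     for c in latex:
--         if c == '\\':
--             armed, has_letter = True, False
--         elif armed and c.isalpha():
--             has_letter = True
--         else:
--             armed, has_letter = False, False
--     return armed and has_letter
-- ===== Notes on version B (the rewrite author's own statement) =====
-- stated objective: alternative
-- what changed: A scans backward from the last character over the trailing alphabetic run and tests whether the character before it is a backslash; B makes a single forward pass driven by a two-flag state machine (suffix-is-backslash-plus-letters, has-at-least-one-letter) and never indexes or looks back.
import Mathlib
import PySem

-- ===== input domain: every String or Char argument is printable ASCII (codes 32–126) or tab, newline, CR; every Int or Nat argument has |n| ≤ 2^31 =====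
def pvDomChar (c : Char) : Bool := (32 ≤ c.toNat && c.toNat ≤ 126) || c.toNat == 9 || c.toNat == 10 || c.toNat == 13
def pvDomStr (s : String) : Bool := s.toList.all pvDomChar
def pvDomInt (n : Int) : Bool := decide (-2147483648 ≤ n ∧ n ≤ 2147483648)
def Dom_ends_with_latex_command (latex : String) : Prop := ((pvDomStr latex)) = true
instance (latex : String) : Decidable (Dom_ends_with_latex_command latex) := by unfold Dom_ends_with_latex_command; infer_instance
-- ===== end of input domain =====

-- B replaces A's backward scan from the last character by a single forward-pass
-- state machine (objective: alternative decomposition, same cost).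


-- ===== PORT A =====
-- the 'for i in range(len(latex)-2, -1, -1)' loop: argument is i+1 (0 = loop exhausted → fall through to 'return False')
def ewlcLoopA (cs : List Char) : Nat → Bool
  | 0 => false
  | i + 1 =>
    let c := PySem.List.pyGetD cs (i : Int) ' '
    if PySem.Chars.isalpha c then ewlcLoopA cs i else decide (c = '\\')

def ends_with_latex_command (latex : String) : Bool :=
  let cs := latex.toList
  if cs.length = 0 then false
  else if PySem.Chars.isalpha (PySem.List.pyGetD cs (-1) ' ') then
    ewlcLoopA cs (cs.length - 1)
  else false

-- ===== PORT B =====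
-- forward DFA state: (armed = suffix so far is '\' followed only by letters, has_letter = that suffix has ≥ 1 letter)
def ewlcStep (st : Bool × Bool) (c : Char) : Bool × Bool :=
  if c = '\\' then (true, false)
  else if st.1 && PySem.Chars.isalpha c then (st.1, true)
  else (false, false)

def ends_with_latex_command_alt (latex : String) : Bool :=
  let st := latex.toList.foldl ewlcStep (false, false)
  st.1 && st.2

-- ===== PRECONDITION & SPEC =====
def Spec_ends_with_latex_command (latex : String) (out : Bool) : Prop := out = ends_with_latex_command_alt latex
instance (latex : String) (out : Bool) : Decidable (Spec_ends_with_latex_command latex out) := by unfold Spec_ends_with_latex_command; infer_instance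

-- ===== CLAIM (what is proved, stated in full; the proofs are below) =====
def Claim_equal_ends_with_latex_command : Prop := ∀ (latex : String), Dom_ends_with_latex_command latex → Spec_ends_with_latex_command latex (ends_with_latex_command latex)

-- ===== LEMMAS AND PROOFS =====

-- on the REVERSED string: first non-letter is a backslash
def ewlcScanB : List Char → Bool
  | [] => false
  | c :: r => if PySem.Chars.isalpha c then ewlcScanB r else decide (c = '\\')

def ewlcHeadAlpha : List Char → Bool
  | [] => false
  | c :: _ => PySem.Chars.isalpha c

theorem ewlcLoopA_eq (cs : List Char) (i : Nat) (h : i ≤ cs.length) :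
    ewlcLoopA cs i = ewlcScanB (cs.take i).reverse := by
  induction i with
  | zero => simp [ewlcLoopA, ewlcScanB]
  | succ i ih =>
    have hi : i < cs.length := by omega
    have htake : (cs.take (i + 1)).reverse = cs[i] :: (cs.take i).reverse := by
      rw [List.take_add_one]
      simp [List.getElem?_eq_getElem hi]
    rw [htake]
    have hget : PySem.List.pyGetD cs (i : Int) ' ' = cs[i] := by
      simp [PySem.List.pyGetD_natCast, List.getD_eq_getElem?_getD, List.getElem?_eq_getElem hi]
    simp only [ewlcLoopA, ewlcScanB, hget]
    by_cases ha : PySem.Chars.isalpha cs[i] <;> simp [ha, ih (by omega)]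

theorem ewlcFold_eq (p : List Char) :
    p.foldl ewlcStep (false, false) =
      (ewlcScanB p.reverse, ewlcScanB p.reverse && ewlcHeadAlpha p.reverse) := by
  induction p using List.reverseRecOn with
  | nil => simp [ewlcScanB, ewlcHeadAlpha]
  | append_singleton p c ih =>
    rw [List.foldl_append, ih, List.reverse_append]
    simp only [List.reverse_singleton, List.singleton_append]
    by_cases hb : c = '\\'
    · subst hb
      have halpha : PySem.Chars.isalpha '\\' = false := by decide
      simp [ewlcStep, ewlcScanB, ewlcHeadAlpha, halpha]
    · by_cases ha : PySem.Chars.isalpha c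
      · by_cases hs : ewlcScanB p.reverse
        · simp [ewlcStep, ewlcScanB, ewlcHeadAlpha, hb, ha, hs]
        · simp [ewlcStep, ewlcScanB, ewlcHeadAlpha, hb, ha, hs]
      · simp [ewlcStep, ewlcScanB, ewlcHeadAlpha, hb, ha]

theorem ewlcAlt_char (latex : String) :
    ends_with_latex_command_alt latex =
      (ewlcHeadAlpha latex.toList.reverse && ewlcScanB latex.toList.reverse.tail) := by
  unfold ends_with_latex_command_alt
  rw [ewlcFold_eq]
  cases h : latex.toList.reverse with
  | nil => simp [ewlcScanB, ewlcHeadAlpha]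
  | cons c r =>
    simp only [ewlcScanB, ewlcHeadAlpha, List.tail_cons]
    by_cases ha : PySem.Chars.isalpha c
    · simp [ha, Bool.and_comm]
    · simp [ha]

theorem ewlcA_char (latex : String) :
    ends_with_latex_command latex =
      (ewlcHeadAlpha latex.toList.reverse && ewlcScanB latex.toList.reverse.tail) := by
  unfold ends_with_latex_command
  cases hcs : latex.toList with
  | nil => simp [ewlcScanB, ewlcHeadAlpha]
  | cons x xs =>
    have hne : latex.toList ≠ [] := by rw [hcs]; simp
    have hlen : latex.toList.length ≠ 0 := by simp [hcs]
    rw [← hcs]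
    have hlast : PySem.List.pyGetD latex.toList (-1) ' ' = latex.toList.getLast hne :=
      PySem.List.pyGetD_neg_one latex.toList ' ' hne
    have hrev : latex.toList.reverse = latex.toList.getLast hne :: latex.toList.dropLast.reverse := by
      conv_lhs => rw [← List.dropLast_append_getLast hne]
      simp
    have hdl : latex.toList.take (latex.toList.length - 1) = latex.toList.dropLast := by
      rw [List.dropLast_eq_take]
    simp only [if_neg hlen, hlast, hrev, ewlcHeadAlpha]
    by_cases ha : PySem.Chars.isalpha (latex.toList.getLast hne)
    · rw [if_pos ha, ewlcLoopA_eq _ _ (by omega), hdl]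
      simp [ha]
    · simp [ha]

-- ===== VERDICT (by name: the statement is the Claim_ definition above) =====
theorem ends_with_latex_command_spec : Claim_equal_ends_with_latex_command := by
  intro latex _
  unfold Spec_ends_with_latex_command
  rw [ewlcA_char, ewlcAlt_char]
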